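-- pv_equiv track=rewrite | github.com/gfidanli/options-helper | apps/streamlit/components/gap_planner.py | _collapse_all_scope
-- ===== SOURCE A (Python) =====
-- from collections import defaultdict
--
-- _ASSET_PRIORITY = {
--     "candles_daily": 10,
--     "option_bars": 20,
--     "options_snapshots": 30,
--     "options_flow": 40,
--     "derived_daily": 50,
-- }
--
-- def _collapse_all_scope(
--     issues: dict[tuple[str, str], set[str]],
-- ) -> dict[tuple[str, str], set[str]]:
--     by_asset: dict[str, dict[str, set[str]]] = defaultdict(lambda: defaultdict(set))
--     for (asset_key, scope_key), reasons in issues.items():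
--         if asset_key not in _ASSET_PRIORITY:
--             continue
--         by_asset[asset_key][scope_key].update(reasons)
--
--     collapsed: dict[tuple[str, str], set[str]] = {}
--     for asset_key, scope_map in by_asset.items():
--         if "ALL" in scope_map:
--             merged: set[str] = set()
--             for reason_set in scope_map.values():
--                 merged.update(reason_set)
--             collapsed[(asset_key, "ALL")] = merged
--             continue
--         for scope_key, reasons in scope_map.items():
--             collapsed[(asset_key, scope_key)] = set(reasons)
--     return collapsed
-- ===== SOURCE B (Python) =====
-- from collections import defaultdict  # (unused; A's module imports it)
--
-- _ASSET_PRIORITY = {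
--     "candles_daily": 10,
--     "option_bars": 20,
--     "options_snapshots": 30,
--     "options_flow": 40,
--     "derived_daily": 50,
-- }
--
--
-- def _collapse_all_scope(
--     issues: dict[tuple[str, str], set[str]],
-- ) -> dict[tuple[str, str], set[str]]:
--     # Pass 1: asset order of first appearance, and which assets carry an "ALL" scope.
--     order: list[str] = []
--     has_all: set[str] = set()
--     for (asset, scope) in issues:
--         if asset in _ASSET_PRIORITY:
--             if asset not in order:
--                 order.append(asset)
--             if scope == "ALL":
--                 has_all.add(asset)
--
--     # Pass 2: per asset, either one merged ALL entry or its scoped entries verbatim.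
--     collapsed: dict[tuple[str, str], set[str]] = {}
--     for asset in order:
--         if asset in has_all:
--             merged: set[str] = set()
--             for (a, _scope), reasons in issues.items():
--                 if a == asset:
--                     merged |= reasons
--             collapsed[(asset, "ALL")] = merged
--         else:
--             for (a, scope), reasons in issues.items():
--                 if a == asset:
--                     collapsed[(a, scope)] = set(reasons)
--     return collapsed
-- ===== Notes on version B (the rewrite author's own statement) =====
-- stated objective: simpler
-- what changed: B drops A's nested defaultdict-of-defaultdict grouping: one pass records the asset order and which assets carry an 'ALL' scope, then a second pass emits each asset's merged 'ALL' entry or its scoped entries directly from the input; Pre_ excludes association lists with duplicate (asset, scope) keys, which cannot represent a Python dict argument.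
import Mathlib
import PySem

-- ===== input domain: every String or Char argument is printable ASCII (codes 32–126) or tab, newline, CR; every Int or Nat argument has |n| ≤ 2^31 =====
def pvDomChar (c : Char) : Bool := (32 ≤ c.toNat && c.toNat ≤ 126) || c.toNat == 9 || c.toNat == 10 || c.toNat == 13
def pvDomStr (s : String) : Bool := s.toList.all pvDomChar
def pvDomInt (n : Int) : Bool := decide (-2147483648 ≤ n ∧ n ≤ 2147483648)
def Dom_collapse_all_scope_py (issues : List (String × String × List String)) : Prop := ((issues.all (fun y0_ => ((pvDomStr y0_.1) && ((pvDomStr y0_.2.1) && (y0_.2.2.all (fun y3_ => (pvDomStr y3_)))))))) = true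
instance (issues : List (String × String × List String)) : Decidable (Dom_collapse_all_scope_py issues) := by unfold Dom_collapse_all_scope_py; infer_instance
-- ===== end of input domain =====

-- B replaces A's nested defaultdict grouping by one pass recording asset order and the
-- assets carrying an "ALL" scope, then emits each asset's collapsed entries directly
-- from the input (objective: simpler — no intermediate nested map).

-- keys of _ASSET_PRIORITY, in order (only membership is ever used)
def pvAssetKeys : List String :=
  ["candles_daily", "option_bars", "options_snapshots", "options_flow", "derived_daily"]

-- ===== PORT A =====
def collapse_all_scope_py (issues : List (String × String × List String)) : List (String × String × List String) :=
  -- by_asset = defaultdict(lambda: defaultdict(set)); the update mutates the nested dicts in place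
  let by_asset : PySem.Dict String (PySem.Dict String (PySem.Set String)) :=
    issues.foldl (fun d e =>
      if pvAssetKeys.contains e.1 then
        d.insert e.1 ((d.getD e.1 PySem.Dict.empty).insert e.2.1
          (PySem.Set.update ((d.getD e.1 PySem.Dict.empty).getD e.2.1 PySem.Set.empty) e.2.2))
      else d) PySem.Dict.empty
  let collapsed : PySem.Dict (String × String) (PySem.Set String) :=
    by_asset.items.foldl (fun c p =>
      if p.2.contains "ALL" then
        let merged : PySem.Set String :=
          p.2.values.foldl (fun m rs => PySem.Set.update m rs) PySem.Set.empty
        c.insert (p.1, "ALL") merged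
      else
        p.2.items.foldl (fun c q => c.insert (p.1, q.1) (PySem.Set.ofList q.2)) c)
      PySem.Dict.empty
  collapsed.items.map (fun p => (p.1.1, p.1.2, p.2))

-- ===== PORT B =====
def collapse_all_scope_py_alt (issues : List (String × String × List String)) : List (String × String × List String) :=
  -- pass 1: asset order of first appearance, and which assets carry an "ALL" scope
  let st : List String × PySem.Set String :=
    issues.foldl (fun st e =>
      if pvAssetKeys.contains e.1 then
        let order := if st.1.contains e.1 then st.1 else st.1 ++ [e.1]
        let hasAll := if e.2.1 == "ALL" then PySem.Set.add st.2 e.1 else st.2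
        (order, hasAll)
      else st) ([], PySem.Set.empty)
  -- pass 2: per asset, one merged ALL entry or its scoped entries verbatim
  let collapsed : PySem.Dict (String × String) (PySem.Set String) :=
    st.1.foldl (fun c a =>
      if st.2.contains a then
        let merged : PySem.Set String :=
          issues.foldl (fun m e => if e.1 == a then PySem.Set.union m e.2.2 else m) PySem.Set.empty
        c.insert (a, "ALL") merged
      else
        issues.foldl (fun c e =>
          if e.1 == a then c.insert (e.1, e.2.1) (PySem.Set.ofList e.2.2) else c) c)
      PySem.Dict.empty
  collapsed.items.map (fun p => (p.1.1, p.1.2, p.2))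

-- ===== PRECONDITION & SPEC =====
-- Pre_ excludes association lists with duplicate (asset, scope) keys: the Python argument is a
-- dict, which cannot carry duplicate keys, so such lists represent no Python input at all.
def Pre_collapse_all_scope_py (issues : List (String × String × List String)) : Prop :=
  (issues.map (fun e => (e.1, e.2.1))).Nodup
instance (issues : List (String × String × List String)) : Decidable (Pre_collapse_all_scope_py issues) := by
  unfold Pre_collapse_all_scope_py; infer_instance

def pvWitness_collapse_all_scope_py : (List (String × String × List String)) :=
  [("candles_daily", "ALL", ["stale"]), ("candles_daily", "2024", ["gap"]), ("option_bars", "SPY", ["gap"])]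

def Spec_collapse_all_scope_py (issues : List (String × String × List String)) (out : List (String × String × List String)) : Prop := out = collapse_all_scope_py_alt issues
instance (issues : List (String × String × List String)) (out : List (String × String × List String)) : Decidable (Spec_collapse_all_scope_py issues out) := by unfold Spec_collapse_all_scope_py; infer_instance

-- ===== CLAIM (what is proved, stated in full; the proofs are below) =====
def Claim_equal_collapse_all_scope_py : Prop := ∀ (issues : List (String × String × List String)), Dom_collapse_all_scope_py issues → Pre_collapse_all_scope_py issues → Spec_collapse_all_scope_py issues (collapse_all_scope_py issues)

-- ===== LEMMAS AND PROOFS =====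

-- entry validity, valid entries, entries of one asset, assets in order, has-ALL flag,
-- merged reason set and per-asset contribution: the common description both ports reach
def pvValid (e : String × String × List String) : Bool := pvAssetKeys.contains e.1

def pvVe (issues : List (String × String × List String)) : List (String × String × List String) :=
  issues.filter pvValid

def pvEntries (issues : List (String × String × List String)) (a : String) :
    List (String × String × List String) :=
  (pvVe issues).filter (fun e => e.1 == a)

def pvAssets (issues : List (String × String × List String)) : List String :=
  PySem.Set.ofList ((pvVe issues).map (fun e => e.1))

def pvHasAll (issues : List (String × String × List String)) (a : String) : Bool :=
  (pvEntries issues a).any (fun e => e.2.1 == "ALL")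

def pvMerged (issues : List (String × String × List String)) (a : String) : PySem.Set String :=
  (pvEntries issues a).foldl (fun m e => PySem.Set.update m (PySem.Set.ofList e.2.2)) PySem.Set.empty

def pvContrib (issues : List (String × String × List String)) (a : String) :
    List ((String × String) × PySem.Set String) :=
  if pvHasAll issues a then [((a, "ALL"), pvMerged issues a)]
  else (pvEntries issues a).map (fun e => ((a, e.2.1), PySem.Set.ofList e.2.2))

def pvInner (es : List (String × String × List String)) : PySem.Dict String (PySem.Set String) :=
  es.foldl (fun m e => m.insert e.2.1 (PySem.Set.ofList e.2.2)) PySem.Dict.empty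

-- updating with a deduplicated list updates with the same elements
lemma pv_update_ofList {α : Type} [BEq α] [LawfulBEq α] (s : PySem.Set α) (xs : List α) :
    PySem.Set.update s (PySem.Set.ofList xs) = PySem.Set.update s xs := by
  induction xs using List.reverseRecOn generalizing s with
  | nil => rfl
  | append_singleton xs x ih =>
    rw [PySem.Set.ofList_append_singleton, PySem.Set.update_append, PySem.Set.add_eq_ite]
    by_cases hx : x ∈ PySem.Set.ofList xs
    · simp only [hx, if_pos]
      rw [ih]
      have hmem : x ∈ PySem.Set.update s xs :=
        (PySem.Set.mem_update _ _ _).mpr (Or.inr ((PySem.Set.mem_ofList _ _).mp hx))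
      rw [show (PySem.Set.update s xs).update [x] = (PySem.Set.update s xs).add x from rfl]
      rw [PySem.Set.add_of_mem hmem]
    · simp only [hx, if_neg, not_false_iff]
      rw [PySem.Set.update_append, ih]

-- getD of a grouping fold = fold over the entries of that key
lemma pv_getD_groupfold {κ ν E : Type} [BEq κ] [LawfulBEq κ] [DecidableEq κ]
    (key : E → κ) (F : ν → E → ν) (dflt : ν) :
    ∀ (l : List E) (d : PySem.Dict κ ν) (a : κ),
    (l.foldl (fun d e => d.insert (key e) (F (d.getD (key e) dflt) e)) d).getD a dflt
      = (l.filter (fun e => key e == a)).foldl F (d.getD a dflt) := by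
  intro l
  induction l with
  | nil => intro d a; rfl
  | cons e l ih =>
    intro d a
    simp only [List.foldl_cons, List.filter_cons]
    by_cases h : key e = a
    · simp only [h, beq_self_eq_true, if_pos, List.foldl_cons]
      rw [ih]
      rw [PySem.Dict.getD_insert_self]
    · have hb : (key e == a) = false := by simp [h]
      simp only [hb, if_neg, Bool.false_eq_true, not_false_iff]
      rw [ih, PySem.Dict.getD_insert_of_ne _ _ _ (Ne.symm h)]

-- with distinct scopes the inner grouping fold inserts each scope's fresh set once
lemma pv_inner_eq (es : List (String × String × List String))
    (hnd : (es.map (fun e => e.2.1)).Nodup) :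
    es.foldl (fun m e => m.insert e.2.1
        (PySem.Set.update (m.getD e.2.1 PySem.Set.empty) e.2.2)) PySem.Dict.empty
      = pvInner es := by
  induction es using List.reverseRecOn with
  | nil => rfl
  | append_singleton es x ih =>
    have hnd' : (es.map (fun e => e.2.1)).Nodup := by
      rw [List.map_append] at hnd; exact hnd.of_append_left
    have hx : x.2.1 ∉ es.map (fun e => e.2.1) := by
      rw [List.map_append] at hnd
      simp only [List.map_cons, List.map_nil] at hnd
      intro hmem
      exact (List.nodup_append.mp hnd).2.2 _ hmem _ (List.mem_singleton_self _) rfl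
    rw [List.foldl_append, ih hnd']
    have hrhs : pvInner (es ++ [x]) = (pvInner es).insert x.2.1 (PySem.Set.ofList x.2.2) := by
      simp only [pvInner, List.foldl_append, List.foldl_cons, List.foldl_nil]
    rw [hrhs]
    simp only [List.foldl_cons, List.foldl_nil]
    have hkeys : (pvInner es).keys = PySem.Set.ofList (es.map (fun e => e.2.1)) := by
      rw [pvInner, PySem.Dict.keys_foldl_insert_key es (fun e => e.2.1) (fun _ e => PySem.Set.ofList e.2.2)]
      simp [PySem.Set.update_nil_left]
    have hcon : (pvInner es).contains x.2.1 = false := by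
      cases h : (pvInner es).contains x.2.1 with
      | false => rfl
      | true =>
        exfalso
        have := (PySem.Dict.contains_iff_mem_keys _ _).mp h
        rw [hkeys] at this
        exact hx ((PySem.Set.mem_ofList _ _).mp this)
    rw [PySem.Dict.getD_of_not_contains _ _ hcon]
    rfl

lemma pv_inner_items (es : List (String × String × List String))
    (hnd : (es.map (fun e => e.2.1)).Nodup) :
    (pvInner es).items = es.map (fun e => (e.2.1, PySem.Set.ofList e.2.2)) := by
  have := PySem.Dict.items_foldl_insert_fresh es (fun e => e.2.1)
      (fun e => PySem.Set.ofList e.2.2) PySem.Dict.empty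
      (fun a _ => PySem.Dict.contains_empty _) hnd
  simpa [pvInner] using this

lemma pv_inner_contains_ALL (es : List (String × String × List String)) :
    (pvInner es).contains "ALL" = es.any (fun e => e.2.1 == "ALL") := by
  rw [Bool.eq_iff_iff]
  rw [PySem.Dict.contains_iff_mem_keys]
  rw [pvInner, PySem.Dict.keys_foldl_insert_key es (fun e => e.2.1) (fun _ e => PySem.Set.ofList e.2.2)]
  rw [PySem.Dict.keys_empty, PySem.Set.update_nil_left]
  constructor
  · intro hm
    rw [List.any_eq_true]
    obtain ⟨e, he, hval⟩ := List.mem_map.mp ((PySem.Set.mem_ofList _ _).mp hm)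
    exact ⟨e, he, by simp [hval]⟩
  · intro hm
    obtain ⟨e, he, hval⟩ := List.any_eq_true.mp hm
    exact (PySem.Set.mem_ofList _ _).mpr (List.mem_map.mpr ⟨e, he, by simpa using hval⟩)

-- a dict whose item keys all avoid first component a cannot contain (a, s)
lemma pv_contains_false (c : PySem.Dict (String × String) (PySem.Set String)) (a s : String)
    (h : ∀ p ∈ c.items, p.1.1 ≠ a) : c.contains (a, s) = false := by
  cases hc : c.contains (a, s) with
  | false => rfl
  | true =>
    exfalso
    have := (PySem.Dict.contains_iff_mem_keys _ _).mp hc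
    simp only [PySem.Dict.keys, List.mem_map] at this
    obtain ⟨p, hp, hpk⟩ := this
    exact h p hp (by rw [hpk])

-- scopes of one asset's entries are distinct when the (asset, scope) keys are
lemma pv_scopes_nodup (issues : List (String × String × List String))
    (h : Pre_collapse_all_scope_py issues) (a : String) :
    ((pvEntries issues a).map (fun e => e.2.1)).Nodup := by
  have hsub : List.Sublist (pvEntries issues a) issues :=
    (List.filter_sublist).trans (List.filter_sublist)
  have hpair : ((pvEntries issues a).map (fun e => (e.1, e.2.1))).Nodup :=
    List.Nodup.sublist (hsub.map _) h
  have hmem : ∀ e ∈ pvEntries issues a, e.1 = a := by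
    intro e he
    have := List.of_mem_filter he
    simpa using this
  have hpair' := List.pairwise_map.mp hpair
  refine List.pairwise_map.mpr (hpair'.imp_of_mem ?_)
  intro x y hx hy hne heq
  exact hne (by rw [hmem x hx, hmem y hy, heq])

lemma pv_assets_valid (issues : List (String × String × List String)) (a : String)
    (ha : a ∈ pvAssets issues) : pvAssetKeys.contains a = true := by
  rw [pvAssets] at ha
  obtain ⟨e, he, rfl⟩ := List.mem_map.mp ((PySem.Set.mem_ofList _ _).mp ha)
  have := List.of_mem_filter he
  simpa [pvValid] using this

-- for a valid asset, filtering the raw list on the asset gives exactly its valid entries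
lemma pv_filter_eq (issues : List (String × String × List String)) (a : String)
    (ha : pvAssetKeys.contains a = true) :
    issues.filter (fun e => e.1 == a) = pvEntries issues a := by
  rw [pvEntries, pvVe, List.filter_filter]
  apply List.filter_congr
  intro e _
  cases h : (e.1 == a) with
  | false => simp [h]
  | true =>
    have h1 : e.1 = a := by simpa using h
    have h2 : a ∈ pvAssetKeys := by simpa using ha
    simp [h, pvValid, h1, h2]

-- generic: a fold over distinct assets, each step appending that asset's contribution
lemma pv_fold_items
    (step : PySem.Dict (String × String) (PySem.Set String) → String →
      PySem.Dict (String × String) (PySem.Set String))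
    (contrib : String → List ((String × String) × PySem.Set String)) :
    ∀ (as : List String) (c : PySem.Dict (String × String) (PySem.Set String)),
    as.Nodup → c.keys.Nodup → (∀ p ∈ c.items, p.1.1 ∉ as) →
    (∀ a ∈ as, ∀ p ∈ contrib a, p.1.1 = a) →
    (∀ a ∈ as, ∀ c' : PySem.Dict (String × String) (PySem.Set String),
        c'.keys.Nodup → (∀ p ∈ c'.items, p.1.1 ≠ a) →
        (step c' a).items = c'.items ++ contrib a ∧ (step c' a).keys.Nodup) →
    (as.foldl step c).items = c.items ++ as.flatMap contrib := by
  intro as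
  induction as with
  | nil => intro c _ _ _ _ _; simp
  | cons a as ih =>
    intro c hnd hk hfresh hckey hstep
    have hstep_a := hstep a (List.mem_cons_self)
    obtain ⟨hitems, hknew⟩ := hstep_a c hk (fun p hp => by
      have := hfresh p hp; simp only [List.mem_cons] at this; tauto)
    simp only [List.foldl_cons]
    rw [ih (step c a) (List.nodup_cons.mp hnd).2 hknew
        (by
          intro p hp
          rw [hitems, List.mem_append] at hp
          rcases hp with hp | hp
          · have := hfresh p hp; simp only [List.mem_cons] at this; tauto
          · have : p.1.1 = a := hckey a (List.mem_cons_self) p hp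
            rw [this]; exact (List.nodup_cons.mp hnd).1
        )
        (fun b hb => hckey b (List.mem_cons_of_mem _ hb))
        (fun b hb => hstep b (List.mem_cons_of_mem _ hb))]
    rw [hitems, List.flatMap_cons, List.append_assoc]

-- A's second stage, as a step over assets
lemma pv_stepA (issues : List (String × String × List String))
    (h : Pre_collapse_all_scope_py issues) (a : String) (ha : a ∈ pvAssets issues)
    (c : PySem.Dict (String × String) (PySem.Set String))
    (hk : c.keys.Nodup) (hfresh : ∀ p ∈ c.items, p.1.1 ≠ a) :
    ((if (pvInner (pvEntries issues a)).contains "ALL" then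
        c.insert (a, "ALL")
          ((pvInner (pvEntries issues a)).values.foldl
            (fun m rs => PySem.Set.update m rs) PySem.Set.empty)
      else
        (pvInner (pvEntries issues a)).items.foldl
          (fun c q => c.insert (a, q.1) (PySem.Set.ofList q.2)) c).items
      = c.items ++ pvContrib issues a) ∧
    ((if (pvInner (pvEntries issues a)).contains "ALL" then
        c.insert (a, "ALL")
          ((pvInner (pvEntries issues a)).values.foldl
            (fun m rs => PySem.Set.update m rs) PySem.Set.empty)
      else
        (pvInner (pvEntries issues a)).items.foldl
          (fun c q => c.insert (a, q.1) (PySem.Set.ofList q.2)) c).keys.Nodup) := by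
  have hscopes := pv_scopes_nodup issues h a
  have hitems := pv_inner_items (pvEntries issues a) hscopes
  rw [pv_inner_contains_ALL]
  by_cases hall : (pvEntries issues a).any (fun e => e.2.1 == "ALL") = true
  · simp only [hall, if_pos]
    have hvals : (pvInner (pvEntries issues a)).values
        = (pvEntries issues a).map (fun e => PySem.Set.ofList e.2.2) := by
      simp only [PySem.Dict.values, hitems, List.map_map]
      rfl
    have hmerged : (pvInner (pvEntries issues a)).values.foldl
        (fun m rs => PySem.Set.update m rs) PySem.Set.empty = pvMerged issues a := by
      rw [hvals, List.foldl_map]; rfl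
    constructor
    · rw [PySem.Dict.items_insert_of_not_contains _ _ (pv_contains_false c a "ALL" hfresh)]
      rw [hmerged, pvContrib, if_pos (by simpa [pvHasAll] using hall)]
    · exact PySem.Dict.nodup_keys_insert _ _ _ hk
  · simp only [hall, if_neg, Bool.false_eq_true, not_false_iff]
    rw [hitems, List.foldl_map]
    have hnd2 : ((pvEntries issues a).map (fun e => (a, e.2.1))).Nodup := by
      have : (pvEntries issues a).map (fun e => (a, e.2.1))
          = ((pvEntries issues a).map (fun e => e.2.1)).map (fun s => (a, s)) := by
        rw [List.map_map]; rfl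
      rw [this]
      exact hscopes.map (fun x y hxy => by simpa using hxy)
    constructor
    · rw [PySem.Dict.items_foldl_insert_fresh (pvEntries issues a)
          (fun e => (a, e.2.1)) (fun e => PySem.Set.ofList (PySem.Set.ofList e.2.2)) c
          (fun e _ => pv_contains_false c a e.2.1 hfresh) hnd2]
      rw [pvContrib, if_neg (by simpa [pvHasAll] using hall)]
      simp [PySem.Set.ofList_ofList]
    · exact PySem.Dict.nodup_keys_foldl_insert_key _ _ _ _ hk

-- A's first-stage grouping dict, named
def pvGroupA (issues : List (String × String × List String)) :
    PySem.Dict String (PySem.Dict String (PySem.Set String)) :=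
  (pvVe issues).foldl (fun d e =>
    d.insert e.1 ((d.getD e.1 PySem.Dict.empty).insert e.2.1
      (PySem.Set.update ((d.getD e.1 PySem.Dict.empty).getD e.2.1 PySem.Set.empty) e.2.2)))
    PySem.Dict.empty

lemma pvGroupA_eq (issues : List (String × String × List String)) :
    issues.foldl (fun d e =>
      if pvAssetKeys.contains e.1 then
        d.insert e.1 ((d.getD e.1 PySem.Dict.empty).insert e.2.1
          (PySem.Set.update ((d.getD e.1 PySem.Dict.empty).getD e.2.1 PySem.Set.empty) e.2.2))
      else d) PySem.Dict.empty = pvGroupA issues := by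
  rw [pvGroupA, pvVe, List.foldl_filter]
  rfl

lemma pvGroupA_keys (issues : List (String × String × List String)) :
    (pvGroupA issues).keys = pvAssets issues := by
  rw [pvGroupA, PySem.Dict.keys_foldl_insert_key (pvVe issues) (fun e => e.1)]
  simp [PySem.Set.update_nil_left, pvAssets]

lemma pvGroupA_getD (issues : List (String × String × List String))
    (h : Pre_collapse_all_scope_py issues) (a : String) :
    (pvGroupA issues).getD a PySem.Dict.empty = pvInner (pvEntries issues a) := by
  rw [pvGroupA]
  rw [pv_getD_groupfold (fun e => e.1)
    (fun m e => m.insert e.2.1 (PySem.Set.update (m.getD e.2.1 PySem.Set.empty) e.2.2))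
    PySem.Dict.empty (pvVe issues) PySem.Dict.empty a]
  rw [PySem.Dict.getD_empty]
  exact pv_inner_eq _ (pv_scopes_nodup issues h a)

lemma pvGroupA_items (issues : List (String × String × List String))
    (h : Pre_collapse_all_scope_py issues) :
    (pvGroupA issues).items
      = (pvAssets issues).map (fun a => (a, pvInner (pvEntries issues a))) := by
  rw [PySem.Dict.items_eq_map_keys _ (by rw [pvGroupA_keys]; exact PySem.Set.nodup_ofList _) PySem.Dict.empty]
  rw [pvGroupA_keys]
  exact List.map_congr_left (fun a _ => by rw [pvGroupA_getD issues h a])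

-- A's collapsed dict, characterised
lemma pv_A_items (issues : List (String × String × List String))
    (h : Pre_collapse_all_scope_py issues) :
    collapse_all_scope_py issues
      = ((pvAssets issues).flatMap (pvContrib issues)).map (fun p => (p.1.1, p.1.2, p.2)) := by
  rw [collapse_all_scope_py]
  rw [pvGroupA_eq, pvGroupA_items issues h, List.foldl_map]
  congr 1
  have := pv_fold_items
    (fun c a =>
      if (pvInner (pvEntries issues a)).contains "ALL" then
        c.insert (a, "ALL")
          ((pvInner (pvEntries issues a)).values.foldl
            (fun m rs => PySem.Set.update m rs) PySem.Set.empty)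
      else
        (pvInner (pvEntries issues a)).items.foldl
          (fun c q => c.insert (a, q.1) (PySem.Set.ofList q.2)) c)
    (pvContrib issues) (pvAssets issues) PySem.Dict.empty
    (PySem.Set.nodup_ofList _)
    (by simp [PySem.Dict.keys_empty])
    (by intro p hp; simp [PySem.Dict.items, PySem.Dict.empty] at hp)
    (by
      intro a _ p hp
      rw [pvContrib] at hp
      split at hp
      · simp only [List.mem_singleton] at hp; rw [hp]
      · simp only [List.mem_map] at hp; obtain ⟨e, _, rfl⟩ := hp; rfl)
    (fun a ha c' hk hfresh => pv_stepA issues h a ha c' hk hfresh)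
  simpa using this

-- B's first pass, characterised
lemma pv_B_addite (o : List String) (x : String) :
    (if o.contains x = true then o else o ++ [x]) = PySem.Set.add o x := by
  rw [PySem.Set.add_eq_ite]
  by_cases hm : x ∈ o
  · simp [hm]
  · simp [hm]

lemma pv_B_state (issues : List (String × String × List String)) :
    ∀ (o : List String) (hs : PySem.Set String),
    issues.foldl (fun st e =>
      if pvAssetKeys.contains e.1 then
        ((if st.1.contains e.1 then st.1 else st.1 ++ [e.1]),
         (if e.2.1 == "ALL" then PySem.Set.add st.2 e.1 else st.2))
      else st) (o, hs)
    = (PySem.Set.update o ((issues.filter pvValid).map (fun e => e.1)),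
       PySem.Set.update hs ((issues.filter (fun e => pvValid e && e.2.1 == "ALL")).map (fun e => e.1))) := by
  induction issues with
  | nil => intro o hs; simp [PySem.Set.update_nil]
  | cons e l ih =>
    intro o hs
    simp only [List.foldl_cons, List.filter_cons]
    by_cases hv : pvAssetKeys.contains e.1 = true
    · simp only [hv, if_true, pvValid, Bool.true_and, ih]
      cases hall : (e.2.1 == "ALL") with
      | true =>
        simp [hall, PySem.Set.update_cons, pv_B_addite o e.1, PySem.Set.add_eq_ite]
      | false =>
        simp [hall, PySem.Set.update_cons, pv_B_addite o e.1, PySem.Set.add_eq_ite]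
    · simp only [pvValid, hv, Bool.false_eq_true, if_false, Bool.false_and]
      exact ih o hs

lemma pv_hasAll_eq (issues : List (String × String × List String)) (a : String) :
    (PySem.Set.ofList ((issues.filter (fun e => pvValid e && e.2.1 == "ALL")).map (fun e => e.1))).contains a
      = pvHasAll issues a := by
  rw [Bool.eq_iff_iff]
  rw [PySem.Set.contains_iff]
  simp only [PySem.Set.mem_ofList, List.mem_map, List.mem_filter, Bool.and_eq_true, beq_iff_eq]
  rw [pvHasAll, List.any_eq_true]
  constructor
  · rintro ⟨e, ⟨he, hval, hall⟩, rfl⟩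
    exact ⟨e, by simp [pvEntries, pvVe, List.mem_filter, he, hval], by simp [hall]⟩
  · rintro ⟨e, he, hall⟩
    have he' := List.mem_filter.mp he
    have he'' := List.mem_filter.mp he'.1
    exact ⟨e, ⟨he''.1, he''.2, by simpa using hall⟩, by simpa using he'.2⟩

-- B's second stage, as a step over assets
lemma pv_stepB (issues : List (String × String × List String))
    (h : Pre_collapse_all_scope_py issues) (a : String) (ha : a ∈ pvAssets issues)
    (c : PySem.Dict (String × String) (PySem.Set String))
    (hk : c.keys.Nodup) (hfresh : ∀ p ∈ c.items, p.1.1 ≠ a) :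
    ((if pvHasAll issues a then
        c.insert (a, "ALL")
          (issues.foldl (fun m e => if e.1 == a then PySem.Set.union m e.2.2 else m) PySem.Set.empty)
      else
        issues.foldl (fun c e =>
          if e.1 == a then c.insert (e.1, e.2.1) (PySem.Set.ofList e.2.2) else c) c).items
      = c.items ++ pvContrib issues a) ∧
    ((if pvHasAll issues a then
        c.insert (a, "ALL")
          (issues.foldl (fun m e => if e.1 == a then PySem.Set.union m e.2.2 else m) PySem.Set.empty)
      else
        issues.foldl (fun c e =>
          if e.1 == a then c.insert (e.1, e.2.1) (PySem.Set.ofList e.2.2) else c) c).keys.Nodup) := by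
  have hscopes := pv_scopes_nodup issues h a
  have hvala := pv_assets_valid issues a ha
  have hfoldfilter : ∀ {β : Type} (f : β → (String × String × List String) → β) (b : β),
      issues.foldl (fun acc e => if e.1 == a then f acc e else acc) b
        = (pvEntries issues a).foldl f b := by
    intro β f b
    rw [← pv_filter_eq issues a hvala, List.foldl_filter]
  by_cases hall : pvHasAll issues a = true
  · simp only [hall, if_pos]
    have hmerged : issues.foldl (fun m e => if e.1 == a then PySem.Set.union m e.2.2 else m) PySem.Set.empty
        = pvMerged issues a := by
      rw [hfoldfilter (fun m e => PySem.Set.union m e.2.2) PySem.Set.empty, pvMerged]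
      apply PySem.List.foldl_congr_mem
      intro m e _
      show PySem.Set.update m e.2.2 = PySem.Set.update m (PySem.Set.ofList e.2.2)
      rw [pv_update_ofList]
    constructor
    · rw [PySem.Dict.items_insert_of_not_contains _ _ (pv_contains_false c a "ALL" hfresh)]
      rw [hmerged, pvContrib, if_pos hall]
    · exact PySem.Dict.nodup_keys_insert _ _ _ hk
  · simp only [hall, Bool.false_eq_true, if_neg, not_false_iff]
    rw [hfoldfilter (fun c e => c.insert (e.1, e.2.1) (PySem.Set.ofList e.2.2)) c]
    have hcongr : (pvEntries issues a).foldl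
        (fun c e => c.insert (e.1, e.2.1) (PySem.Set.ofList e.2.2)) c
        = (pvEntries issues a).foldl
            (fun c e => c.insert (a, e.2.1) (PySem.Set.ofList e.2.2)) c := by
      apply PySem.List.foldl_congr_mem
      intro acc e he
      have : e.1 = a := by
        have := List.of_mem_filter he
        simpa using this
      rw [this]
    rw [hcongr]
    have hnd2 : ((pvEntries issues a).map (fun e => (a, e.2.1))).Nodup := by
      have : (pvEntries issues a).map (fun e => (a, e.2.1))
          = ((pvEntries issues a).map (fun e => e.2.1)).map (fun s => (a, s)) := by
        rw [List.map_map]; rfl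
      rw [this]
      exact hscopes.map (fun x y hxy => by simpa using hxy)
    constructor
    · rw [PySem.Dict.items_foldl_insert_fresh (pvEntries issues a)
          (fun e => (a, e.2.1)) (fun e => PySem.Set.ofList e.2.2) c
          (fun e _ => pv_contains_false c a e.2.1 hfresh) hnd2]
      rw [pvContrib, if_neg (by simp [hall])]
    · exact PySem.Dict.nodup_keys_foldl_insert_key _ _ _ _ hk

lemma pv_B_items (issues : List (String × String × List String))
    (h : Pre_collapse_all_scope_py issues) :
    collapse_all_scope_py_alt issues
      = ((pvAssets issues).flatMap (pvContrib issues)).map (fun p => (p.1.1, p.1.2, p.2)) := by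
  rw [collapse_all_scope_py_alt]
  rw [pv_B_state issues [] PySem.Set.empty]
  rw [PySem.Set.update_nil_left]
  rw [show ∀ l : List String, PySem.Set.update PySem.Set.empty l = PySem.Set.ofList l from
    fun l => PySem.Set.update_nil_left l]
  congr 1
  have horder : (PySem.Set.ofList ((issues.filter pvValid).map (fun e => e.1)) : List String)
      = pvAssets issues := rfl
  rw [horder]
  have hconv : ∀ (c : PySem.Dict (String × String) (PySem.Set String)),
      (pvAssets issues).foldl (fun c a =>
        if (PySem.Set.ofList ((issues.filter (fun e => pvValid e && e.2.1 == "ALL")).map (fun e => e.1))).contains a then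
          c.insert (a, "ALL")
            (issues.foldl (fun m e => if e.1 == a then PySem.Set.union m e.2.2 else m) PySem.Set.empty)
        else
          issues.foldl (fun c e =>
            if e.1 == a then c.insert (e.1, e.2.1) (PySem.Set.ofList e.2.2) else c) c) c
      = (pvAssets issues).foldl (fun c a =>
        if pvHasAll issues a then
          c.insert (a, "ALL")
            (issues.foldl (fun m e => if e.1 == a then PySem.Set.union m e.2.2 else m) PySem.Set.empty)
        else
          issues.foldl (fun c e =>
            if e.1 == a then c.insert (e.1, e.2.1) (PySem.Set.ofList e.2.2) else c) c) c := by
    intro c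
    apply PySem.List.foldl_congr_mem
    intro acc a _
    rw [pv_hasAll_eq]
  rw [hconv]
  have hfi := pv_fold_items _ (pvContrib issues) (pvAssets issues) PySem.Dict.empty
    (PySem.Set.nodup_ofList _)
    (by simp [PySem.Dict.keys_empty])
    (by intro p hp; simp [PySem.Dict.items, PySem.Dict.empty] at hp)
    (by
      intro a _ p hp
      rw [pvContrib] at hp
      split at hp
      · simp only [List.mem_singleton] at hp; rw [hp]
      · simp only [List.mem_map] at hp; obtain ⟨e, _, rfl⟩ := hp; rfl)
    (fun a ha c' hk hfresh => pv_stepB issues h a ha c' hk hfresh)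
  rw [hfi]
  rfl

-- ===== VERDICT (by name: the statement is the Claim_ definition above) =====
theorem collapse_all_scope_py_spec : Claim_equal_collapse_all_scope_py := by
  intro issues _ hpre
  unfold Spec_collapse_all_scope_py
  rw [pv_A_items issues hpre, pv_B_items issues hpre]
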